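-- pv_equiv track=rewrite | github.com/t3kt/raytk | src/lib/raytkShader.py | simplifyNames
-- ===== SOURCE A (Python) =====
-- from typing import List, Set, Iterable, Union
--
-- def simplifyNames(fullNames: List[Union[str, 'Cell']], sep='_'):
-- 	"""
-- 	Removes prefixes shared by all the provided names.
--
-- 	For example, ["FOO_x", "FOO_abc", "FOO_asdf"] would produce ["x", "abc", "asdf"]
-- 	"""
-- 	if not fullNames:
-- 		return []
-- 	fullNames = [str(n) for n in fullNames]
-- 	if len(fullNames) != 1 and not any(sep not in n for n in fullNames):
-- 		prefixes = [
-- 			n.rsplit(sep, maxsplit=1)[0] + sep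
-- 			for n in fullNames
-- 		]
-- 		commonPrefix = _longestCommonPrefix(prefixes)
-- 		if commonPrefix and not commonPrefix.endswith(sep):
-- 			commonPrefix = commonPrefix.rsplit(sep, maxsplit=1)[0] + sep
-- 		if commonPrefix:
-- 			prefixLen = len(commonPrefix)
-- 			return [
-- 				n[prefixLen:]
-- 				for n in fullNames
-- 			]
-- 	return fullNames
--
-- def _longestCommonPrefix(strs):
-- 	if not strs:
-- 		return []
-- 	for i, letter_group in enumerate(zip(*strs)):
-- 		if len(set(letter_group)) > 1:
-- 			return strs[0][:i]
-- 	else: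
-- 		return min(strs)
-- ===== SOURCE B (Python) =====
-- def simplifyNames(fullNames, sep='_'):
-- 	if not fullNames:
-- 		return []
-- 	fullNames = [str(n) for n in fullNames]
-- 	if len(fullNames) != 1 and all(sep in n for n in fullNames):
-- 		# longest common prefix of the raw names, from the lexicographic
-- 		# extremes only: every name lies between lo and hi, so the common
-- 		# prefix of lo and hi is the common prefix of all names.
-- 		lo = min(fullNames)
-- 		hi = max(fullNames)
-- 		i = 0
-- 		while i < len(lo) and lo[i] == hi[i]:
-- 			i += 1
-- 		commonPrefix = lo[:i]
-- 		if commonPrefix and not commonPrefix.endswith(sep):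
-- 			j = commonPrefix.rfind(sep)
-- 			commonPrefix = (commonPrefix[:j] if j >= 0 else commonPrefix) + sep
-- 		if commonPrefix:
-- 			k = len(commonPrefix)
-- 			return [n[k:] for n in fullNames]
-- 	return fullNames
-- ===== Notes on version B (the rewrite author's own statement) =====
-- stated objective: alternative
-- what changed: B drops A's intermediate per-name rsplit-prefixes list and its column-wise zip/set LCP scan: it computes the longest common prefix of the raw names directly by scanning only the two lexicographic extremes (min/max), then applies the single trim-to-last-separator rule once.
import Mathlib
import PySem

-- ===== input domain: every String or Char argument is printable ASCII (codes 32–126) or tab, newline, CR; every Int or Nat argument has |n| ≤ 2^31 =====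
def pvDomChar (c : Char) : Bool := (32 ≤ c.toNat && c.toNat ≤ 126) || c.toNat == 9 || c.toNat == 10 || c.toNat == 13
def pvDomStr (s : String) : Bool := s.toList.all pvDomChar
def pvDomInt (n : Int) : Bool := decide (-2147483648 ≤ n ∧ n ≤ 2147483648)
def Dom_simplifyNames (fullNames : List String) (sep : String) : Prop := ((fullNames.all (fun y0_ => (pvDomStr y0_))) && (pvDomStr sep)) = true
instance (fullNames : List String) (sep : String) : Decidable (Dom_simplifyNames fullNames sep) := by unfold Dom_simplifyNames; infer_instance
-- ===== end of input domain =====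

-- B replaces A's per-name rsplit-prefix list + column-wise LCP scan by one LCP of the raw
-- names taken from the two lexicographic extremes, followed by A's single trim rule
-- (objective: alternative decomposition, same cost).

-- ===== PORT A =====

-- n.rsplit(sep, maxsplit=1)[0]; exact for sep ≠ "" (Python raises ValueError on sep = '',
-- which Pre_ excludes for every input that reaches an rsplit call)
def pvRsplitHead (n sepL : List Char) : List Char :=
  let i := PySem.Chars.rfind n sepL
  if i < 0 then n else n.take i.toNat

-- number of columns of zip(*strs): the minimal length
def pvMinLen (strs : List (List Char)) : Nat :=
  match strs with
  | [] => 0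
  | s :: r => r.foldl (fun a t => min a t.length) s.length

-- min(strs): Python's running minimum over a nonempty string list (first minimal
-- element; on the lexicographic linear order binary min keeps the same value)
def pvMinStr (strs : List (List Char)) : List Char :=
  match strs with
  | [] => []
  | x :: t => t.foldl min x

-- the `for i, letter_group in enumerate(zip(*strs))` loop of _longestCommonPrefix:
-- letter_group is column i; `len(set(letter_group)) > 1` tests a repeated element
def pvLcpGo (strs : List (List Char)) (i fuel : Nat) : List Char :=
  match fuel with
  | 0 => pvMinStr strs                      -- loop exhausted: `return min(strs)`
  | fuel + 1 =>
    if 1 < (PySem.Set.ofList (strs.map (fun s => s.getD i ' '))).length then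
      (strs.headD []).take i                -- `return strs[0][:i]`
    else pvLcpGo strs (i + 1) fuel

-- _longestCommonPrefix (Python returns the empty LIST for empty input; A never calls it on [])
def pvLongestCommonPrefix (strs : List (List Char)) : List Char :=
  pvLcpGo strs 0 (pvMinLen strs)

def simplifyNames (fullNames : List String) (sep : String) : List String :=
  if fullNames = [] then []
  else
    -- `fullNames = [str(n) for n in fullNames]` is the identity on a list of str
    if fullNames.length ≠ 1 ∧ (fullNames.any (fun n => !(PySem.Str.isIn sep n))) = false then
      let prefixes := fullNames.map (fun n => pvRsplitHead n.toList sep.toList ++ sep.toList)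
      let commonPrefix := pvLongestCommonPrefix prefixes
      let commonPrefix :=
        if commonPrefix ≠ [] ∧ PySem.Chars.endswith commonPrefix sep.toList = false then
          pvRsplitHead commonPrefix sep.toList ++ sep.toList
        else commonPrefix
      if commonPrefix ≠ [] then
        fullNames.map (fun n => String.ofList (PySem.List.slice n.toList (some (commonPrefix.length : Int)) none))
      else fullNames
    else fullNames

-- ===== PORT B =====

-- max(strs): Python's running maximum (same note as pvMinStr)
def pvMaxStr (strs : List (List Char)) : List Char :=
  match strs with
  | [] => []
  | x :: t => t.foldl max x

-- Source B's `while i < len(lo) and lo[i] == hi[i]: i += 1; lo[:i]` char scan, as structural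
-- recursion over the two lists (lo ≤ hi lexicographically whenever called, so the Python
-- loop never reads past hi)
def pvLcp2 (lo hi : List Char) : List Char :=
  match lo, hi with
  | a :: lo', b :: hi' => if a = b then a :: pvLcp2 lo' hi' else []
  | _, _ => []

def simplifyNames_alt (fullNames : List String) (sep : String) : List String :=
  if fullNames = [] then []
  else
    let names := fullNames.map String.toList
    let sepL := sep.toList
    if fullNames.length ≠ 1 ∧ (names.all (fun n => PySem.Chars.isIn sepL n)) = true then
      let lo := pvMinStr names
      let hi := pvMaxStr names
      let c0 := pvLcp2 lo hi
      let c :=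
        if c0 ≠ [] ∧ PySem.Chars.endswith c0 sepL = false then
          (let j := PySem.Chars.rfind c0 sepL
           (if 0 ≤ j then c0.take j.toNat else c0) ++ sepL)
        else c0
      if c ≠ [] then names.map (fun n => String.ofList (n.drop c.length)) else fullNames
    else fullNames

-- ===== PRECONDITION & SPEC =====
-- Pre_ excludes only sep = "" with at least two names: there Python's rsplit('', 1) raises
-- ValueError, so A returns no value.
def Pre_simplifyNames (fullNames : List String) (sep : String) : Prop :=
  ¬ (sep = "" ∧ 2 ≤ fullNames.length)
instance (fullNames : List String) (sep : String) : Decidable (Pre_simplifyNames fullNames sep) := by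
  unfold Pre_simplifyNames; infer_instance

def pvWitness_simplifyNames : List String × String := (["FOO_x", "FOO_abc", "FOO_asdf"], "_")

def Spec_simplifyNames (fullNames : List String) (sep : String) (out : List String) : Prop :=
  out = simplifyNames_alt fullNames sep
instance (fullNames : List String) (sep : String) (out : List String) : Decidable (Spec_simplifyNames fullNames sep out) := by
  unfold Spec_simplifyNames; infer_instance

-- ===== CLAIM (what is proved, stated in full; the proofs are below) =====
def Claim_equal_simplifyNames : Prop := ∀ (fullNames : List String) (sep : String), Dom_simplifyNames fullNames sep → Pre_simplifyNames fullNames sep → Spec_simplifyNames fullNames sep (simplifyNames fullNames sep)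

-- ===== LEMMAS AND PROOFS =====

-- proof-side names for the two ports' final steps (used to state intermediate goals)
def pvFinishA (fullNames : List String) (c : List Char) : List String :=
  if c ≠ [] then
    fullNames.map (fun n => String.ofList (PySem.List.slice n.toList (some (c.length : Int)) none))
  else fullNames
def pvFinishB (names : List (List Char)) (fullNames : List String) (c : List Char) : List String :=
  if c ≠ [] then names.map (fun n => String.ofList (n.drop c.length)) else fullNames

-- a proper prefix is lexicographically smaller
theorem pvLexOfPrefixNe (a b : List Char) (h : a <+: b) (hne : a ≠ b) :
    List.Lex (· < ·) a b := by
  induction a generalizing b with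
  | nil =>
    cases b with
    | nil => exact absurd rfl hne
    | cons c t => exact List.Lex.nil
  | cons c t ih =>
    obtain ⟨u, rfl⟩ := h
    refine List.Lex.cons (ih (t ++ u) ⟨u, rfl⟩ ?_)
    intro he
    have hl := congrArg List.length he
    simp at hl
    exact hne (by simp [hl.symm.symm])

-- a common prefix of lo and hi is a prefix of anything between them
theorem pvSandwich (p lo hi s : List Char) (h1 : p <+: lo) (h2 : p <+: hi)
    (hls : ¬ List.Lex (· < ·) s lo) (hsh : ¬ List.Lex (· < ·) hi s) : p <+: s := by
  induction p generalizing lo hi s with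
  | nil => exact List.nil_prefix
  | cons c t ih =>
    obtain ⟨u, rfl⟩ := h1
    obtain ⟨v, rfl⟩ := h2
    cases s with
    | nil => exact absurd List.Lex.nil hls
    | cons d s' =>
      rcases lt_trichotomy c d with hcd | rfl | hdc
      · exact absurd (List.Lex.rel hcd) hsh
      · refine List.cons_prefix_cons.mpr ⟨rfl, ih (t ++ u) (t ++ v) s' ⟨u, rfl⟩ ⟨v, rfl⟩ ?_ ?_⟩
        · intro hl; exact hls (List.Lex.cons hl)
        · intro hl; exact hsh (List.Lex.cons hl)
      · exact absurd (List.Lex.rel hdc) hls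

theorem pvPrefixAntisymm (a b : List Char) (h1 : a <+: b) (h2 : b <+: a) : a = b :=
  List.IsPrefix.eq_of_length h1 (le_antisymm h1.length_le h2.length_le)

-- rfind.go returns the highest occurrence start ≤ its counter, or -1
theorem pvRfindGoSpec (s sub : List Char) (k : Nat) :
    (PySem.Chars.rfind.go s sub k = -1 ∧ ∀ j ≤ k, ¬ sub <+: s.drop j) ∨
    (∃ j : Nat, j ≤ k ∧ PySem.Chars.rfind.go s sub k = (j : Int) ∧ sub <+: s.drop j ∧
      ∀ i, j < i → i ≤ k → ¬ sub <+: s.drop i) := by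
  induction k with
  | zero =>
    by_cases h : sub <+: s
    · right
      exact ⟨0, le_refl 0, by simp [PySem.Chars.rfind.go, List.isPrefixOf_iff_prefix, h], by simpa using h, by omega⟩
    · left
      refine ⟨by simp [PySem.Chars.rfind.go, List.isPrefixOf_iff_prefix, h], ?_⟩
      intro j hj
      interval_cases j
      simpa using h
  | succ k ih =>
    by_cases h : sub <+: s.drop (k + 1)
    · right
      exact ⟨k + 1, le_refl _, by simp [PySem.Chars.rfind.go, List.isPrefixOf_iff_prefix, h], h, by omega⟩
    · have hgo : PySem.Chars.rfind.go s sub (k + 1) = PySem.Chars.rfind.go s sub k := by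
        simp [PySem.Chars.rfind.go, List.isPrefixOf_iff_prefix, h]
      rcases ih with ⟨h1, h2⟩ | ⟨j, hj, hgo', hocc, hmax⟩
      · left
        refine ⟨hgo.trans h1, ?_⟩
        intro j hj
        rcases Nat.lt_or_ge j (k + 1) with hlt | hge
        · exact h2 j (by omega)
        · have : j = k + 1 := by omega
          subst this; exact h
      · right
        refine ⟨j, by omega, hgo.trans hgo', hocc, ?_⟩
        intro i hji hik
        rcases Nat.lt_or_ge i (k + 1) with hlt | hge
        · exact hmax i hji (by omega)
        · have : i = k + 1 := by omega
          subst this; exact h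
theorem pvDropNilPrefix (s sub : List Char) (hsub : sub ≠ []) (j : Nat) (hj : s.length < j)
    (h : sub <+: s.drop j) : False := by
  rw [List.drop_eq_nil_of_le (by omega)] at h
  exact hsub (List.prefix_nil.mp h)

theorem pvRfindSpec (s sub : List Char) (hsub : sub ≠ []) :
    (PySem.Chars.rfind s sub = -1 ∧ ∀ j, ¬ sub <+: s.drop j) ∨
    (∃ j : Nat, PySem.Chars.rfind s sub = (j : Int) ∧ sub <+: s.drop j ∧
      ∀ i, j < i → ¬ sub <+: s.drop i) := by
  have hdef : PySem.Chars.rfind s sub = PySem.Chars.rfind.go s sub s.length := rfl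
  rcases pvRfindGoSpec s sub s.length with ⟨h1, h2⟩ | ⟨j, hj, hgo, hocc, hmax⟩
  · left
    refine ⟨hdef.trans h1, ?_⟩
    intro j
    rcases Nat.lt_or_ge s.length j with hlt | hle
    · exact fun h => pvDropNilPrefix s sub hsub j hlt h
    · exact h2 j hle
  · right
    refine ⟨j, hdef.trans hgo, hocc, ?_⟩
    intro i hji
    rcases Nat.lt_or_ge s.length i with hlt | hle
    · exact fun h => pvDropNilPrefix s sub hsub i hlt h
    · exact hmax i hji hle

theorem pvRfindPosSpec (n sub : List Char) (hsub : sub ≠ [])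
    (hin : PySem.Chars.isIn sub n = true) :
    PySem.Chars.rfind n sub = ((PySem.Chars.rfind n sub).toNat : Int) ∧
    sub <+: n.drop (PySem.Chars.rfind n sub).toNat ∧
    ∀ i, (PySem.Chars.rfind n sub).toNat < i → ¬ sub <+: n.drop i := by
  rcases pvRfindSpec n sub hsub with ⟨_, h2⟩ | ⟨j, hj, hocc, hmax⟩
  · obtain ⟨j, hjp⟩ := (PySem.Chars.exists_prefix_drop_iff_isIn sub n).mpr hin
    exact absurd hjp (h2 j)
  · rw [hj]
    simpa using ⟨hocc, hmax⟩

theorem pvRfindEqOf (s sub : List Char) (hsub : sub ≠ []) (k : Nat)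
    (h1 : sub <+: s.drop k) (h2 : ∀ i, k < i → ¬ sub <+: s.drop i) :
    PySem.Chars.rfind s sub = (k : Int) := by
  rcases pvRfindSpec s sub hsub with ⟨_, hno⟩ | ⟨j, hj, hocc, hmax⟩
  · exact absurd h1 (hno k)
  · rcases Nat.lt_trichotomy j k with h | h | h
    · exact absurd h1 (hmax k h)
    · rw [hj, h]
    · exact absurd hocc (h2 j h)

-- pvPfx sepL n is the element of A's `prefixes` built from n; pvE its length
def pvPfx (sepL n : List Char) : List Char := pvRsplitHead n sepL ++ sepL
def pvE (sepL n : List Char) : Nat := (PySem.Chars.rfind n sepL).toNat + sepL.length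

theorem pvPfx_eq_take (sepL n : List Char) (hsub : sepL ≠ [])
    (hin : PySem.Chars.isIn sepL n = true) :
    pvPfx sepL n = n.take (pvE sepL n) ∧ pvE sepL n ≤ n.length := by
  obtain ⟨hnn, hocc, _⟩ := pvRfindPosSpec n sepL hsub hin
  set r := (PySem.Chars.rfind n sepL).toNat with hr
  have hnot : ¬ PySem.Chars.rfind n sepL < 0 := by rw [hnn]; omega
  have hlen : sepL.length ≤ (n.drop r).length := hocc.length_le
  have hrle : r ≤ n.length := by
    by_contra hc
    rw [List.drop_eq_nil_of_le (by omega)] at hocc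
    exact hsub (List.prefix_nil.mp hocc)
  constructor
  · show pvRsplitHead n sepL ++ sepL = _
    rw [pvRsplitHead]
    simp only [hnot, if_false, ← hr]
    rw [pvE, List.take_add, ← hr]
    congr 1
    exact List.prefix_iff_eq_take.mp hocc
  · rw [pvE, ← hr]
    simp at hlen
    omega

theorem pvMinLenFoldl (r : List (List Char)) (a : Nat) :
    (∀ t ∈ r, r.foldl (fun a t => min a t.length) a ≤ t.length) ∧
    r.foldl (fun a t => min a t.length) a ≤ a ∧
    (r.foldl (fun a t => min a t.length) a = a ∨
      ∃ t ∈ r, r.foldl (fun a t => min a t.length) a = t.length) := by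
  induction r generalizing a with
  | nil => simp
  | cons x r ih =>
    obtain ⟨h1, h2, h3⟩ := ih (min a x.length)
    refine ⟨?_, by simpa using le_trans h2 (min_le_left _ _), ?_⟩
    · intro t ht
      rcases List.mem_cons.mp ht with rfl | ht
      · exact le_trans h2 (min_le_right _ _)
      · exact h1 t ht
    · rcases h3 with h3 | ⟨t, ht, h3⟩
      · rcases Nat.le_total a x.length with hax | hax
        · left
          rw [List.foldl_cons]
          rw [h3]
          exact min_eq_left hax
        · right
          refine ⟨x, by simp, ?_⟩
          rw [List.foldl_cons]
          rw [h3]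
          exact min_eq_right hax
      · right; exact ⟨t, by simp [ht], h3⟩
theorem pvMinLen_le (strs : List (List Char)) : ∀ s ∈ strs, pvMinLen strs ≤ s.length := by
  intro s hs
  match strs, hs with
  | x :: r, hs =>
    rcases List.mem_cons.mp hs with rfl | hs
    · exact (pvMinLenFoldl r s.length).2.1
    · exact (pvMinLenFoldl r x.length).1 s hs

theorem pvMinLen_mem (strs : List (List Char)) (h : strs ≠ []) :
    ∃ s ∈ strs, s.length = pvMinLen strs := by
  match strs with
  | x :: r =>
    rcases (pvMinLenFoldl r x.length).2.2 with h3 | ⟨t, ht, h3⟩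
    · exact ⟨x, by simp, h3.symm⟩
    · exact ⟨t, by simp [ht], h3.symm⟩

theorem pvTakeEqOfCols (strs : List (List Char)) (i : Nat)
    (hi : ∀ s ∈ strs, i ≤ s.length)
    (hcols : ∀ j, j < i → ∀ s ∈ strs, ∀ t ∈ strs, s.getD j ' ' = t.getD j ' ')
    (s t : List Char) (hs : s ∈ strs) (ht : t ∈ strs) : s.take i = t.take i := by
  apply List.ext_getElem
  · simp [Nat.min_eq_left (hi s hs), Nat.min_eq_left (hi t ht)]
  · intro j h1 h2
    simp only [List.getElem_take]
    have hjs : j < s.length := by simp at h1; omega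
    have hjt : j < t.length := by simp at h2; omega
    have := hcols j (by simp at h1; omega) s hs t ht
    rwa [List.getD_eq_getElem s ' ' hjs, List.getD_eq_getElem t ' ' hjt] at this
-- min(strs) / max(strs) on a nonempty list of strings: Python's running extremum
-- (first extremal element; on a linear order binary min/max keeps the same value)
theorem pvFoldlMinSpec (t : List (List Char)) (x : List Char) :
    (t.foldl min x = x ∨ t.foldl min x ∈ t) ∧ t.foldl min x ≤ x ∧
      ∀ y ∈ t, t.foldl min x ≤ y := by
  induction t generalizing x with
  | nil => simp
  | cons z t ih =>
    obtain ⟨hmem, hle, hall⟩ := ih (min x z)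
    rw [List.foldl_cons]
    refine ⟨?_, le_trans hle (min_le_left x z), ?_⟩
    · rcases hmem with h | h
      · rcases le_total x z with hxz | hxz
        · rw [h, min_eq_left hxz]; exact Or.inl rfl
        · rw [h, min_eq_right hxz]; exact Or.inr (by simp)
      · exact Or.inr (by simp [h])
    · intro y hy
      rcases List.mem_cons.mp hy with rfl | hy
      · exact le_trans hle (min_le_right x y)
      · exact hall y hy

theorem pvFoldlMaxSpec (t : List (List Char)) (x : List Char) :
    (t.foldl max x = x ∨ t.foldl max x ∈ t) ∧ x ≤ t.foldl max x ∧
      ∀ y ∈ t, y ≤ t.foldl max x := by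
  induction t generalizing x with
  | nil => simp
  | cons z t ih =>
    obtain ⟨hmem, hge, hall⟩ := ih (max x z)
    rw [List.foldl_cons]
    refine ⟨?_, le_trans (le_max_left x z) hge, ?_⟩
    · rcases hmem with h | h
      · rcases le_total x z with hxz | hxz
        · rw [h, max_eq_right hxz]; exact Or.inr (by simp)
        · rw [h, max_eq_left hxz]; exact Or.inl rfl
      · exact Or.inr (by simp [h])
    · intro y hy
      rcases List.mem_cons.mp hy with rfl | hy
      · exact le_trans (le_max_right x y) hge
      · exact hall y hy

theorem pvMinStr_spec (strs : List (List Char)) (hne : strs ≠ []) :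
    pvMinStr strs ∈ strs ∧ ∀ y ∈ strs, ¬ List.Lex (· < ·) y (pvMinStr strs) := by
  match strs with
  | x :: t =>
    obtain ⟨hmem, hle, hall⟩ := pvFoldlMinSpec t x
    have hdef : pvMinStr (x :: t) = t.foldl min x := rfl
    rw [hdef]
    constructor
    · rcases hmem with h | h
      · rw [h]; simp
      · simp [h]
    · intro y hy
      rcases List.mem_cons.mp hy with rfl | hy
      · exact not_lt_of_ge hle
      · exact not_lt_of_ge (hall y hy)

theorem pvMaxStr_spec (strs : List (List Char)) (hne : strs ≠ []) :
    pvMaxStr strs ∈ strs ∧ ∀ y ∈ strs, ¬ List.Lex (· < ·) (pvMaxStr strs) y := by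
  match strs with
  | x :: t =>
    obtain ⟨hmem, hge, hall⟩ := pvFoldlMaxSpec t x
    have hdef : pvMaxStr (x :: t) = t.foldl max x := rfl
    rw [hdef]
    constructor
    · rcases hmem with h | h
      · rw [h]; simp
      · simp [h]
    · intro y hy
      rcases List.mem_cons.mp hy with rfl | hy
      · exact not_lt_of_ge hge
      · exact not_lt_of_ge (hall y hy)

theorem pvLcp2_prefix (lo hi : List Char) : pvLcp2 lo hi <+: lo ∧ pvLcp2 lo hi <+: hi := by
  induction lo generalizing hi with
  | nil => simp [pvLcp2]
  | cons a lo' ih =>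
    cases hi with
    | nil => simp [pvLcp2]
    | cons b hi' =>
      by_cases hab : a = b
      · subst hab
        simp only [pvLcp2]
        exact ⟨List.cons_prefix_cons.mpr ⟨rfl, (ih hi').1⟩,
          List.cons_prefix_cons.mpr ⟨rfl, (ih hi').2⟩⟩
      · simp [pvLcp2, hab]

theorem pvLcp2_max (lo hi q : List Char) (h1 : q <+: lo) (h2 : q <+: hi) :
    q <+: pvLcp2 lo hi := by
  induction q generalizing lo hi with
  | nil => exact List.nil_prefix
  | cons c q' ih =>
    cases lo with
    | nil => exact absurd (List.prefix_nil.mp h1) (by simp)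
    | cons a lo' =>
      cases hi with
      | nil => exact absurd (List.prefix_nil.mp h2) (by simp)
      | cons b hi' =>
        obtain ⟨rfl, h1'⟩ := List.cons_prefix_cons.mp h1
        obtain ⟨rfl, h2'⟩ := List.cons_prefix_cons.mp h2
        simp only [pvLcp2]
        exact List.cons_prefix_cons.mpr ⟨rfl, ih lo' hi' h1' h2'⟩
theorem pvSetCard (col : List Char) :
    1 < (PySem.Set.ofList col).length ↔ ∃ x ∈ col, ∃ y ∈ col, x ≠ y := by
  constructor
  · intro h
    match hS : PySem.Set.ofList col with
    | [] => rw [hS] at h; simp at h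
    | [a] => rw [hS] at h; simp at h
    | a :: b :: r =>
      have hnd := PySem.Set.nodup_ofList col
      rw [hS] at hnd
      have hab : a ≠ b := by
        intro he
        exact (List.nodup_cons.mp hnd).1 (he ▸ List.mem_cons_self ..)
      have ha : a ∈ col := (PySem.Set.mem_ofList col a).mp (by rw [hS]; simp)
      have hb : b ∈ col := (PySem.Set.mem_ofList col b).mp (by rw [hS]; simp)
      exact ⟨a, ha, b, hb, hab⟩
  · rintro ⟨x, hx, y, hy, hne⟩
    by_contra h
    push_neg at h
    have hx' : x ∈ PySem.Set.ofList col := (PySem.Set.mem_ofList col x).mpr hx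
    have hy' : y ∈ PySem.Set.ofList col := (PySem.Set.mem_ofList col y).mpr hy
    match hS : PySem.Set.ofList col with
    | [] => rw [hS] at hx'; simp at hx'
    | [a] =>
      rw [hS] at hx' hy'
      simp at hx' hy'
      exact hne (hx'.trans hy'.symm)
    | a :: b :: r => rw [hS] at h; simp at h
theorem pvLcpGoSpec (strs : List (List Char)) (hne : strs ≠ []) (i fuel : Nat)
    (hfi : i + fuel = pvMinLen strs)
    (hcols : ∀ j, j < i → ∀ s ∈ strs, ∀ t ∈ strs, s.getD j ' ' = t.getD j ' ') :
    (∀ s ∈ strs, pvLcpGo strs i fuel <+: s) ∧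
    (∀ q, (∀ s ∈ strs, q <+: s) → q <+: pvLcpGo strs i fuel) := by
  induction fuel generalizing i with
  | zero =>
    obtain ⟨s₀, hs₀, hlen⟩ := pvMinLen_mem strs hne
    have hi : i = pvMinLen strs := by omega
    have hile : ∀ s ∈ strs, i ≤ s.length := fun s hs => hi ▸ pvMinLen_le strs s hs
    have hcp : ∀ s ∈ strs, s₀ <+: s := by
      intro s hs
      rw [List.prefix_iff_eq_take, hlen, ← hi]
      rw [← pvTakeEqOfCols strs i hile hcols s₀ s hs₀ hs]
      rw [List.take_of_length_le (by omega)]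
    have hmin := pvMinStr_spec strs hne
    have hms : pvMinStr strs = s₀ := by
      by_contra hc
      exact hmin.2 s₀ hs₀ (pvLexOfPrefixNe s₀ (pvMinStr strs) (hcp _ hmin.1) (fun h => hc h.symm))
    have hgo : pvLcpGo strs i 0 = pvMinStr strs := rfl
    rw [hgo, hms]
    exact ⟨hcp, fun q hq => hq s₀ hs₀⟩
  | succ fuel ih =>
    have hilt : i < pvMinLen strs := by omega
    have hile : ∀ s ∈ strs, i ≤ s.length := by
      intro s hs
      have := pvMinLen_le strs s hs
      omega
    rw [pvLcpGo]
    split_ifs with hcard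
    · -- the column at i disagrees: the loop returns strs[0][:i]
      obtain ⟨x, hx, y, hy, hxy⟩ := (pvSetCard _).mp hcard
      obtain ⟨sx, hsx, hsxe⟩ := List.mem_map.mp hx
      obtain ⟨sy, hsy, hsye⟩ := List.mem_map.mp hy
      have hhd : strs.headD [] ∈ strs := by
        match strs with
        | z :: r => simp
      constructor
      · intro s hs
        have heq : (strs.headD []).take i = s.take i :=
          pvTakeEqOfCols strs i hile hcols (strs.headD []) s hhd hs
        rw [heq]
        exact List.take_prefix i s
      · intro q hq
        have hqlen : q.length ≤ i := by
          by_contra hc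
          push_neg at hc
          have hgx : sx.getD i ' ' = q[i]'(by omega) := by
            have hql : i < sx.length := by
              have := (hq sx hsx).length_le
              omega
            rw [List.getD_eq_getElem sx ' ' hql]
            exact (List.IsPrefix.getElem (hq sx hsx) (by omega)).symm
          have hgy : sy.getD i ' ' = q[i]'(by omega) := by
            have hql : i < sy.length := by
              have := (hq sy hsy).length_le
              omega
            rw [List.getD_eq_getElem sy ' ' hql]
            exact (List.IsPrefix.getElem (hq sy hsy) (by omega)).symm
          rw [← hsxe, ← hsye] at hxy
          exact hxy (hgx.trans hgy.symm)
        exact List.prefix_take_iff.mpr ⟨hq (strs.headD []) hhd, hqlen⟩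
    · -- the column at i agrees everywhere: continue the scan
      push_neg at hcard
      have hcols' : ∀ j, j < i + 1 → ∀ s ∈ strs, ∀ t ∈ strs, s.getD j ' ' = t.getD j ' ' := by
        intro j hj s hs t ht
        rcases Nat.lt_or_ge j i with hji | hji
        · exact hcols j hji s hs t ht
        · have hj : j = i := by omega
          subst hj
          have hone : ∀ x ∈ strs.map (fun s => s.getD j ' '), ∀ y ∈ strs.map (fun s => s.getD j ' '), x = y := by
            intro x hx y hy
            by_contra hxy
            exact absurd ((pvSetCard _).mpr ⟨x, hx, y, hy, hxy⟩) (by omega)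
          exact hone _ (List.mem_map_of_mem hs) _ (List.mem_map_of_mem ht)
      exact ih (i + 1) (by omega) hcols'

theorem pvArgmin (l : List (List Char)) (f : List Char → Nat) (h : l ≠ []) :
    ∃ a ∈ l, ∀ b ∈ l, f a ≤ f b := by
  induction l with
  | nil => exact absurd rfl h
  | cons x t ih =>
    cases t with
    | nil => exact ⟨x, by simp, by simp⟩
    | cons z r =>
      obtain ⟨a, ha, hmin⟩ := ih (by simp)
      rcases Nat.le_total (f x) (f a) with hxa | hxa
      · refine ⟨x, by simp, ?_⟩
        intro b hb
        rcases List.mem_cons.mp hb with rfl | hb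
        · exact le_refl _
        · exact le_trans hxa (hmin b hb)
      · refine ⟨a, by simp [ha], ?_⟩
        intro b hb
        rcases List.mem_cons.mp hb with rfl | hb
        · exact hxa
        · exact hmin b hb

theorem pvLcpASpec (strs : List (List Char)) (hne : strs ≠ []) :
    (∀ s ∈ strs, pvLongestCommonPrefix strs <+: s) ∧
    (∀ q, (∀ s ∈ strs, q <+: s) → q <+: pvLongestCommonPrefix strs) :=
  pvLcpGoSpec strs hne 0 (pvMinLen strs) (by omega) (by omega)

theorem pvLcpBSpec (names : List (List Char)) (hne : names ≠ []) :
    (∀ s ∈ names, pvLcp2 (pvMinStr names) (pvMaxStr names) <+: s) ∧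
    (∀ q, (∀ s ∈ names, q <+: s) → q <+: pvLcp2 (pvMinStr names) (pvMaxStr names)) := by
  obtain ⟨hlo, hhi⟩ := pvLcp2_prefix (pvMinStr names) (pvMaxStr names)
  constructor
  · intro s hs
    exact pvSandwich _ _ _ s hlo hhi ((pvMinStr_spec names hne).2 s hs)
      ((pvMaxStr_spec names hne).2 s hs)
  · intro q hq
    exact pvLcp2_max _ _ q (hq _ (pvMinStr_spec names hne).1) (hq _ (pvMaxStr_spec names hne).1)

-- the shared trim rule applied to A's LCP-of-prefixes and to B's LCP-of-names agree
theorem pvCore (names : List (List Char)) (sepL : List Char) (hne : names ≠ [])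
    (hsep : sepL ≠ []) (hall : ∀ n ∈ names, PySem.Chars.isIn sepL n = true) :
    (let P := pvLongestCommonPrefix (names.map (fun n => pvRsplitHead n sepL ++ sepL))
     if P ≠ [] ∧ PySem.Chars.endswith P sepL = false then pvRsplitHead P sepL ++ sepL else P)
    = (let L := pvLcp2 (pvMinStr names) (pvMaxStr names)
       if L ≠ [] ∧ PySem.Chars.endswith L sepL = false then
         (if 0 ≤ PySem.Chars.rfind L sepL then L.take (PySem.Chars.rfind L sepL).toNat else L) ++ sepL
       else L) := by
  obtain ⟨hLcp, hLmax⟩ := pvLcpBSpec names hne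
  set L := pvLcp2 (pvMinStr names) (pvMaxStr names) with hLdef
  have hPne : names.map (fun n => pvRsplitHead n sepL ++ sepL) ≠ [] := by
    simpa using hne
  obtain ⟨hPcp, hPmax⟩ := pvLcpASpec _ hPne
  set P := pvLongestCommonPrefix (names.map (fun n => pvRsplitHead n sepL ++ sepL)) with hPdef
  show (if P ≠ [] ∧ PySem.Chars.endswith P sepL = false then pvRsplitHead P sepL ++ sepL else P)
    = (if L ≠ [] ∧ PySem.Chars.endswith L sepL = false then
        (if 0 ≤ PySem.Chars.rfind L sepL then L.take (PySem.Chars.rfind L sepL).toNat else L) ++ sepL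
      else L)
  have hpfx : ∀ n ∈ names, pvRsplitHead n sepL ++ sepL = n.take (pvE sepL n) ∧ pvE sepL n ≤ n.length :=
    fun n hn => pvPfx_eq_take sepL n hsep (hall n hn)
  have hpfxpre : ∀ n ∈ names, pvRsplitHead n sepL ++ sepL <+: n := by
    intro n hn
    rw [(hpfx n hn).1]
    exact List.take_prefix _ n
  have htake : ∀ n ∈ names, ∀ k, k ≤ L.length → n.take k = L.take k := by
    intro n hn k hk
    obtain ⟨t, ht⟩ := hLcp n hn
    rw [← ht, List.take_append_of_le_length hk]
  obtain ⟨nj, hnj, hjmin⟩ := pvArgmin names (fun n => pvE sepL n) hne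
  obtain ⟨hjint, hjocc, hjmax⟩ := pvRfindPosSpec nj sepL hsep (hall nj hnj)
  set rj := (PySem.Chars.rfind nj sepL).toNat with hrj
  have hej : pvE sepL nj = rj + sepL.length := rfl
  have hpfxj : pvRsplitHead nj sepL ++ sepL = nj.take (pvE sepL nj) := (hpfx nj hnj).1
  have hejle : pvE sepL nj ≤ nj.length := (hpfx nj hnj).2
  by_cases hle : pvE sepL nj ≤ L.length
  · -- the minimal last-separator cut lies inside L: P is exactly that cut
    have hPeq : P = nj.take (pvE sepL nj) := by
      apply pvPrefixAntisymm
      · rw [← hpfxj]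
        exact hPcp _ (List.mem_map_of_mem hnj)
      · apply hPmax
        intro p hp
        obtain ⟨n, hn, rfl⟩ := List.mem_map.mp hp
        rw [(hpfx n hn).1]
        rw [htake nj hnj _ hle, ← htake n hn _ hle]
        exact List.take_prefix_take_left (hjmin n hn)
    have hPend : PySem.Chars.endswith P sepL = true := by
      rw [hPeq, ← hpfxj]
      exact (PySem.Chars.endswith_iff _ _).mpr (List.suffix_append _ _)
    have hPneq : P ≠ [] := by
      rw [hPeq, ← hpfxj]
      exact List.append_ne_nil_of_right_ne_nil _ hsep
    rw [if_neg (fun hc => by simp [hPend] at hc)]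
    rcases eq_or_lt_of_le hle with heq | hlt
    · -- the cut is all of L: L itself ends with sep, neither side trims
      have hPL : P = L := by
        rw [hPeq, htake nj hnj _ hle, heq, List.take_length]
      have hLend : PySem.Chars.endswith L sepL = true := hPL ▸ hPend
      rw [if_neg (fun hc => by simp [hLend] at hc)]
      exact hPL
    · -- the cut is strictly inside L: B's trim rediscovers exactly it
      have hLne : L ≠ [] := by
        intro h0
        rw [h0] at hlt
        simp at hlt
      have hLnotend : PySem.Chars.endswith L sepL = false := by
        rcases hend : PySem.Chars.endswith L sepL with _ | _
        · rfl
        · exfalso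
          obtain ⟨w, hw⟩ := (PySem.Chars.endswith_iff _ _).mp hend
          obtain ⟨t, ht⟩ := hLcp nj hnj
          have hocc : sepL <+: nj.drop w.length := by
            rw [← ht, ← hw, List.append_assoc, List.drop_left]
            exact List.prefix_append sepL t
          have hwlen : w.length + sepL.length = L.length := by
            have h1 := congrArg List.length hw
            simpa using h1
          exact hjmax w.length (by omega) hocc
      have hLtake : L.take rj = nj.take rj := (htake nj hnj rj (by omega)).symm
      have hrL : PySem.Chars.rfind L sepL = (rj : Int) := by
        apply pvRfindEqOf L sepL hsep rj
        · -- sepL occurs in L at rj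
          have h1 : L.take (pvE sepL nj) = L.take rj ++ (L.drop rj).take sepL.length := by
            rw [hej]
            exact List.take_add
          have h2 : nj.take (pvE sepL nj) = nj.take rj ++ (nj.drop rj).take sepL.length := by
            rw [hej]
            exact List.take_add
          have h3 : (nj.drop rj).take sepL.length = sepL :=
            (List.prefix_iff_eq_take.mp hjocc).symm
          have h4 : L.take rj ++ (L.drop rj).take sepL.length = L.take rj ++ sepL := by
            calc L.take rj ++ (L.drop rj).take sepL.length
                = L.take (pvE sepL nj) := h1.symm
              _ = nj.take (pvE sepL nj) := (htake nj hnj _ hle).symm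
              _ = nj.take rj ++ sepL := by rw [h2, h3]
              _ = L.take rj ++ sepL := by rw [hLtake]
          have h5 : (L.drop rj).take sepL.length = sepL := List.append_cancel_left h4
          rw [List.prefix_iff_eq_take]
          exact h5.symm
        · intro i hi hocc
          rcases Nat.lt_or_ge L.length i with hiL | hiL
          case _ =>
            rw [List.drop_eq_nil_of_le (by omega)] at hocc
            exact hsep (List.prefix_nil.mp hocc)
          case _ =>
            obtain ⟨t, ht⟩ := hLcp nj hnj
            have : sepL <+: nj.drop i := by
              rw [← ht, List.drop_append_of_le_length hiL]
              exact hocc.trans (List.prefix_append _ t)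
            exact hjmax i (by omega) this
      rw [if_pos ⟨hLne, hLnotend⟩, hrL, if_pos (Int.natCast_nonneg rj)]
      have hrsp : pvRsplitHead nj sepL = nj.take rj := by
        unfold pvRsplitHead
        rw [if_neg (by rw [hjint]; omega)]
      rw [Int.toNat_natCast, hPeq, ← hpfxj, hrsp, hLtake]
  · -- every last-separator cut extends past L: P = L and the two trims coincide
    have hPL : P = L := by
      apply pvPrefixAntisymm
      · apply hLmax
        intro n hn
        exact (hPcp _ (List.mem_map_of_mem hn)).trans (hpfxpre n hn)
      · apply hPmax
        intro p hp
        obtain ⟨n, hn, rfl⟩ := List.mem_map.mp hp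
        rw [(hpfx n hn).1]
        refine List.prefix_take_iff.mpr ⟨hLcp n hn, ?_⟩
        have h1 := hjmin n hn
        simp only at h1
        omega
    rw [hPL]
    by_cases hc : L ≠ [] ∧ PySem.Chars.endswith L sepL = false
    · rw [if_pos hc, if_pos hc]
      congr 1
      unfold pvRsplitHead
      by_cases h0 : PySem.Chars.rfind L sepL < 0
      · rw [if_pos h0, if_neg (by omega)]
      · rw [if_neg h0, if_pos (by omega)]
    · rw [if_neg hc, if_neg hc]

-- ===== VERDICT (by name: the statement is the Claim_ definition above) =====
theorem simplifyNames_spec : Claim_equal_simplifyNames := by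
  intro fullNames sep _hdom hpre
  show simplifyNames fullNames sep = simplifyNames_alt fullNames sep
  by_cases hnil : fullNames = []
  · rw [simplifyNames, simplifyNames_alt, if_pos hnil, if_pos hnil]
  · rw [simplifyNames, simplifyNames_alt, if_neg hnil, if_neg hnil]
    by_cases hg : fullNames.length ≠ 1 ∧ (fullNames.any (fun n => !(PySem.Str.isIn sep n))) = false
    · -- two or more names, all containing sep
      have hall : ∀ n ∈ fullNames.map String.toList, PySem.Chars.isIn sep.toList n = true := by
        intro n hn
        obtain ⟨m, hm, rfl⟩ := List.mem_map.mp hn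
        have := hg.2
        rw [List.any_eq_false] at this
        have h2 := this m hm
        simpa using h2
      have hg' : fullNames.length ≠ 1 ∧ ((fullNames.map String.toList).all (fun n => PySem.Chars.isIn sep.toList n)) = true := by
        refine ⟨hg.1, ?_⟩
        rw [List.all_eq_true]
        exact hall
      rw [if_pos hg, if_pos hg']
      have hlen2 : 2 ≤ fullNames.length := by
        have h0 : fullNames.length ≠ 0 := fun h => hnil (List.eq_nil_of_length_eq_zero h)
        have h1 := hg.1
        omega
      have hsepne : sep.toList ≠ [] := by
        intro h0
        have h1 : sep.toList = ("" : String).toList := by rw [h0]; rfl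
        exact hpre ⟨String.toList_inj.mp h1, hlen2⟩
      have hne : fullNames.map String.toList ≠ [] := by simpa using hnil
      have hcore := pvCore (fullNames.map String.toList) sep.toList hne hsepne hall
      have hmm : (fullNames.map String.toList).map (fun n => pvRsplitHead n sep.toList ++ sep.toList)
          = fullNames.map (fun n => pvRsplitHead n.toList sep.toList ++ sep.toList) := by
        simp [List.map_map, Function.comp]
      rw [hmm] at hcore
      show pvFinishA fullNames
          (let P := pvLongestCommonPrefix (fullNames.map (fun n => pvRsplitHead n.toList sep.toList ++ sep.toList))
           if P ≠ [] ∧ PySem.Chars.endswith P sep.toList = false then pvRsplitHead P sep.toList ++ sep.toList else P)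
        = pvFinishB (fullNames.map String.toList) fullNames
          (let L := pvLcp2 (pvMinStr (fullNames.map String.toList)) (pvMaxStr (fullNames.map String.toList))
           if L ≠ [] ∧ PySem.Chars.endswith L sep.toList = false then
             (if 0 ≤ PySem.Chars.rfind L sep.toList then L.take (PySem.Chars.rfind L sep.toList).toNat else L) ++ sep.toList
           else L)
      rw [hcore]
      set c := (let L := pvLcp2 (pvMinStr (fullNames.map String.toList)) (pvMaxStr (fullNames.map String.toList))
        if L ≠ [] ∧ PySem.Chars.endswith L sep.toList = false then
          (if 0 ≤ PySem.Chars.rfind L sep.toList then L.take (PySem.Chars.rfind L sep.toList).toNat else L) ++ sep.toList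
        else L) with hc
      rw [pvFinishA, pvFinishB]
      by_cases hcne : c ≠ []
      · rw [if_pos hcne, if_pos hcne]
        simp only [List.map_map]
        apply List.map_congr_left
        intro n _
        simp only [Function.comp]
        rw [PySem.List.slice_from n.toList (by omega : (0:Int) ≤ ((c.length : Int)))]
        rw [Int.toNat_natCast]
      · rw [if_neg hcne, if_neg hcne]
    · rw [if_neg hg]
      have hg' : ¬ (fullNames.length ≠ 1 ∧ ((fullNames.map String.toList).all (fun n => PySem.Chars.isIn sep.toList n)) = true) := by
        intro hc
        apply hg
        refine ⟨hc.1, ?_⟩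
        rw [List.any_eq_false]
        intro n hn
        have := hc.2
        rw [List.all_eq_true] at this
        have h2 := this n.toList (List.mem_map_of_mem hn)
        simp [h2]
      rw [if_neg hg']
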